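-- pv_equiv track=rewrite | github.com/MinKyeom/KMK-DREAM | Programmers/lv2/양궁 대회.py | solution
-- ===== SOURCE A (Python) =====
-- def solution(n, info):
--     apeach = sum([10 - i for i in range(10) if info[i]])
--     # info[i]는 info 0이외의 값
--
--     score = [(10 - i) * 2 if info[i] else 10 - i for i in range(10)]
--
--     queue = [[0]]
--     # 쏜다 안쏜다의 기준에서 10점을 안쏘는 경우 추가!
--
--     result = []
--     # 최종 결과를 담을 리스트
--
--     if n >= info[0] + 1:
--         queue.append([info[0] + 1])
--
--     while queue:
--         recent = queue.pop(0)
--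
--         if sum(recent) == n or len(recent) == 10:
--             new = sum([score[i] for i in range(len(recent)) if recent[i]])
--             old = sum([score[i] for i in range(len(result)) if result[i]])
--
--             if new > apeach and new >= old:
--                 result = recent
--
--         elif sum(recent) + info[len(recent)] + 1 <= n:
--             queue.append(recent + [info[len(recent)] + 1])
--             queue.append(recent + [0])
--
--         else:
--             queue.append(recent + [0])
--
--     if not result:
--         return [-1]
--
--     return result + [0] * (10 - len(result)) + [n - sum(result)]
--
--     return result
-- ===== SOURCE B (Python) =====
-- def solution(n, info):
--     apeach = sum(10 - i for i in range(10) if info[i])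
--     score = [(10 - i) * 2 if info[i] else 10 - i for i in range(10)]
--
--     def value(r):
--         return sum(score[i] for i in range(len(r)) if r[i])
--
--     def levels(depth, frontier, result):
--         # process one generation of partial arrangements per ring depth
--         if depth > 10:
--             return result
--         nxt = []
--         for r in frontier:
--             if sum(r) == n or depth == 10:
--                 v = value(r)
--                 if v > apeach and v >= value(result):
--                     result = r
--             else:
--                 shot = info[depth] + 1
--                 if sum(r) + shot <= n:
--                     nxt.append(r + [shot])
--                 nxt.append(r + [0])
--         return levels(depth + 1, nxt, result)
--
--     start = [[0]]
--     if info[0] + 1 <= n: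
--         start.append([info[0] + 1])
--     result = levels(1, start, [])
--     if not result:
--         return [-1]
--     return result + [0] * (10 - len(result)) + [n - sum(result)]
-- ===== Notes on version B (the rewrite author's own statement) =====
-- stated objective: alternative
-- what changed: A runs a single FIFO queue with pop(0) interleaving partial arrangements of all depths; B replaces the queue by a recursion over the ring index that keeps one frontier list per depth and folds the leaf comparisons level by level, eliminating the O(queue) pop(0) shifting.
import Mathlib
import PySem

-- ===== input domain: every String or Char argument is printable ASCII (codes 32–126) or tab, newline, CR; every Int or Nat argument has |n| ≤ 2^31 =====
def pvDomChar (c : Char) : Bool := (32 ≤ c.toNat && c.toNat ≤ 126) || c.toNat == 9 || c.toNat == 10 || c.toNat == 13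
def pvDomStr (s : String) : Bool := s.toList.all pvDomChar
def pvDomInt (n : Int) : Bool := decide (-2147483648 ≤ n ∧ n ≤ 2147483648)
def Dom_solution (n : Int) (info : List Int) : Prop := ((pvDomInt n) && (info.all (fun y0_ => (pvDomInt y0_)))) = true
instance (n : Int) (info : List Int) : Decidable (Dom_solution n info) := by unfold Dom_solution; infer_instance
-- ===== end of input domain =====

-- A explores arrangements with one FIFO queue mixing depths; B recurses over the ring index keeping a
-- per-depth frontier list (alternative decomposition, same enumeration order and tie-breaking; same cost).


-- ===== PORT A =====
-- apeach = sum([10 - i for i in range(10) if info[i]])  (info[i] raises IndexError when len(info) < 10: excluded by Pre_)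
def pvA_apeach (info : List Int) : Int :=
  (((PySem.List.pyRange 0 10 1).filter (fun i => PySem.List.pyGetD info i 0 ≠ 0)).map (fun i => 10 - i)).sum

-- score = [(10 - i) * 2 if info[i] else 10 - i for i in range(10)]
def pvA_score (info : List Int) : List Int :=
  (PySem.List.pyRange 0 10 1).map (fun i => if PySem.List.pyGetD info i 0 ≠ 0 then (10 - i) * 2 else 10 - i)

-- sum([score[i] for i in range(len(r)) if r[i]])  (score[i] in range: r never longer than 10 = len(score))
def pvA_value (score r : List Int) : Int :=
  (((PySem.List.pyRange 0 (r.length : Int) 1).filter (fun i => PySem.List.pyGetD r i 0 ≠ 0)).map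
    (fun i => PySem.List.pyGetD score i 0)).sum

-- the while-queue loop of A (FIFO: pop(0) from the front, append children at the back)
def pvA_loop (n : Int) (info score : List Int) (apeach : Int) : List (List Int) → List Int → List Int
  | [], result => result
  | r :: rest, result =>
    if r.sum = n ∨ r.length = 10 then
      let new := pvA_value score r
      let old := pvA_value score result
      pvA_loop n info score apeach rest (if new > apeach ∧ new ≥ old then r else result)
    else if _h : r.length < 10 then
      -- Python reads info[len(recent)] here; none = IndexError, excluded by Pre_
      match PySem.List.pyGet? info (r.length : Int) with
      | none => result
      | some v =>
        if r.sum + v + 1 ≤ n then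
          pvA_loop n info score apeach (rest ++ [r ++ [v + 1], r ++ [0]]) result
        else
          pvA_loop n info score apeach (rest ++ [r ++ [0]]) result
    else result  -- totalization guard only: queue entries never exceed length 10
termination_by q _ => (q.map (fun r => 3 ^ (11 - r.length))).sum
decreasing_by
  · simp only [List.map_cons, List.sum_cons]
    have : 0 < 3 ^ (11 - r.length) := Nat.pow_pos (by norm_num)
    omega
  · simp only [List.map_append, List.sum_append, List.map_cons, List.sum_cons, List.map_nil,
      List.sum_nil, List.length_append, List.length_singleton]
    have h1 : 11 - r.length = (10 - r.length) + 1 := by omega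
    have h2 : 11 - (r.length + 1) = 10 - r.length := by omega
    have h3 : 0 < 3 ^ (10 - r.length) := Nat.pow_pos (by norm_num)
    rw [h1, h2, pow_succ]
    omega
  · simp only [List.map_append, List.sum_append, List.map_cons, List.sum_cons, List.map_nil,
      List.sum_nil, List.length_append, List.length_singleton]
    have h1 : 11 - r.length = (10 - r.length) + 1 := by omega
    have h2 : 11 - (r.length + 1) = 10 - r.length := by omega
    have h3 : 0 < 3 ^ (10 - r.length) := Nat.pow_pos (by norm_num)
    rw [h1, h2, pow_succ]
    omega

def solution (n : Int) (info : List Int) : List Int :=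
  let apeach := pvA_apeach info
  let score := pvA_score info
  -- queue = [[0]]; if n >= info[0] + 1: queue.append([info[0] + 1])   (info[0] IndexError excluded by Pre_)
  let queue := if n ≥ PySem.List.pyGetD info 0 0 + 1
    then [[(0 : Int)], [PySem.List.pyGetD info 0 0 + 1]] else [[(0 : Int)]]
  let result := pvA_loop n info score apeach queue []
  if result = [] then [-1]
  else result ++ List.replicate (10 - result.length) 0 ++ [n - result.sum]

-- ===== PORT B =====
def pvB_apeach (info : List Int) : Int :=
  (((PySem.List.pyRange 0 10 1).filter (fun i => PySem.List.pyGetD info i 0 ≠ 0)).map (fun i => 10 - i)).sum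

def pvB_score (info : List Int) : List Int :=
  (PySem.List.pyRange 0 10 1).map (fun i => if PySem.List.pyGetD info i 0 ≠ 0 then (10 - i) * 2 else 10 - i)

def pvB_value (score r : List Int) : Int :=
  (((PySem.List.pyRange 0 (r.length : Int) 1).filter (fun i => PySem.List.pyGetD r i 0 ≠ 0)).map
    (fun i => PySem.List.pyGetD score i 0)).sum

-- levels(depth, frontier, result): one generation of partial arrangements per ring depth
def pvB_levels (n : Int) (info score : List Int) (apeach : Int) (depth : Int)
    (frontier : List (List Int)) (result : List Int) : List Int :=
  if depth > 10 then result
  else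
    let st := frontier.foldl (fun (st : List (List Int) × List Int) r =>
      if r.sum = n ∨ depth = 10 then
        let v := pvB_value score r
        (st.1, if v > apeach ∧ v ≥ pvB_value score st.2 then r else st.2)
      else
        -- Python reads info[depth] here; IndexError excluded by Pre_ (defaulted, never hit under Pre_)
        let shot := PySem.List.pyGetD info depth 0 + 1
        (if r.sum + shot ≤ n then st.1 ++ [r ++ [shot], r ++ [0]] else st.1 ++ [r ++ [0]], st.2))
      ([], result)
    pvB_levels n info score apeach (depth + 1) st.1 st.2
termination_by (11 - depth).toNat
decreasing_by omega

def solution_alt (n : Int) (info : List Int) : List Int :=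
  let apeach := pvB_apeach info
  let score := pvB_score info
  let start := [[(0 : Int)]] ++
    (if PySem.List.pyGetD info 0 0 + 1 ≤ n then [[PySem.List.pyGetD info 0 0 + 1]] else [])
  let result := pvB_levels n info score apeach 1 start []
  if result = [] then [-1]
  else result ++ List.replicate (10 - result.length) 0 ++ [n - result.sum]

-- ===== PRECONDITION & SPEC =====
-- Pre_ excludes exactly the inputs on which A raises IndexError (info[i] for i in range(10) needs 10 entries)
def Pre_solution (n : Int) (info : List Int) : Prop := 10 ≤ info.length
instance (n : Int) (info : List Int) : Decidable (Pre_solution n info) := by unfold Pre_solution; infer_instance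

def pvWitness_solution : Int × List Int := (5, [2, 1, 1, 1, 0, 0, 0, 0, 0, 0])

def Spec_solution (n : Int) (info : List Int) (out : List Int) : Prop := out = solution_alt n info
instance (n : Int) (info : List Int) (out : List Int) : Decidable (Spec_solution n info out) := by unfold Spec_solution; infer_instance

-- ===== CLAIM (what is proved, stated in full; the proofs are below) =====
def Claim_equal_solution : Prop := ∀ (n : Int) (info : List Int), Dom_solution n info → Pre_solution n info → Spec_solution n info (solution n info)

-- ===== LEMMAS AND PROOFS =====

-- leaf update step shared by both loops
def pvStep (n apeach : Int) (score res r : List Int) : List Int :=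
  if r.sum = n ∨ r.length = 10 then
    (if pvA_value score r > apeach ∧ pvA_value score r ≥ pvA_value score res then r else res)
  else res

-- children of a non-leaf node (empty list for a leaf)
def pvExp (n : Int) (info : List Int) (r : List Int) : List (List Int) :=
  if r.sum = n ∨ r.length = 10 then []
  else if r.sum + PySem.List.pyGetD info (r.length : Int) 0 + 1 ≤ n
    then [r ++ [PySem.List.pyGetD info (r.length : Int) 0 + 1], r ++ [0]]
    else [r ++ [0]]

theorem pvGet_some (info : List Int) (k : Nat) (h : k < info.length) :
    PySem.List.pyGet? info (k : Int) = some (PySem.List.pyGetD info (k : Int) 0) := by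
  rw [PySem.List.pyGet?_natCast, PySem.List.pyGetD_ofNat info k 0 h, List.getElem?_eq_getElem h]

-- L1: the FIFO loop processes a block xs, emitting leaf updates in order and queueing children behind ys
theorem pvA_loop_split (n : Int) (info score : List Int) (apeach : Int)
    (hlen : 10 ≤ info.length) :
    ∀ (xs ys : List (List Int)) (res : List Int), (∀ r ∈ xs, r.length ≤ 10) →
      pvA_loop n info score apeach (xs ++ ys) res
        = pvA_loop n info score apeach (ys ++ xs.flatMap (pvExp n info))
            (xs.foldl (pvStep n apeach score) res) := by
  intro xs
  induction xs with
  | nil => intro ys res _; simp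
  | cons r xs ih =>
    intro ys res hx
    have hr10 : r.length ≤ 10 := hx r (List.mem_cons_self ..)
    have hxs : ∀ r' ∈ xs, r'.length ≤ 10 := fun r' h => hx r' (List.mem_cons_of_mem _ h)
    rw [List.cons_append]
    by_cases hleaf : r.sum = n ∨ r.length = 10
    · rw [pvA_loop, if_pos hleaf, ih _ _ hxs]
      simp only [List.flatMap_cons, List.foldl_cons, pvExp, pvStep, if_pos hleaf]
      simp
    · have hlt : r.length < 10 := by
        rcases Nat.lt_or_ge r.length 10 with h | h
        · exact h
        · exfalso; exact hleaf (Or.inr (by omega))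
      have hget := pvGet_some info r.length (lt_of_lt_of_le hlt hlen)
      rw [pvA_loop]
      rw [if_neg hleaf, dif_pos hlt, hget]
      simp only [List.flatMap_cons, List.foldl_cons]
      have hstep : pvStep n apeach score res r = res := by simp [pvStep, if_neg hleaf]
      rw [hstep]
      by_cases hshoot : r.sum + PySem.List.pyGetD info (↑r.length) 0 + 1 ≤ n
      · rw [if_pos hshoot]
        rw [List.append_assoc, ih _ _ hxs]
        have hexp : pvExp n info r
            = [r ++ [PySem.List.pyGetD info (↑r.length) 0 + 1], r ++ [0]] := by
          rw [pvExp, if_neg hleaf, if_pos hshoot]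
        rw [hexp, List.append_assoc]

      · rw [if_neg hshoot]
        rw [List.append_assoc, ih _ _ hxs]
        have hexp : pvExp n info r = [r ++ [0]] := by
          rw [pvExp, if_neg hleaf, if_neg hshoot]
        rw [hexp, List.append_assoc]


theorem pvB_fold (n : Int) (info score : List Int) (apeach : Int) (d : Nat) :
    ∀ (F : List (List Int)) (acc : List (List Int)) (res : List Int), (∀ r ∈ F, r.length = d) →
      F.foldl (fun (st : List (List Int) × List Int) r =>
        if r.sum = n ∨ (d : Int) = 10 then
          let v := pvB_value score r
          (st.1, if v > apeach ∧ v ≥ pvB_value score st.2 then r else st.2)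
        else
          let shot := PySem.List.pyGetD info (d : Int) 0 + 1
          (if r.sum + shot ≤ n then st.1 ++ [r ++ [shot], r ++ [0]] else st.1 ++ [r ++ [0]], st.2))
        (acc, res)
      = (acc ++ F.flatMap (pvExp n info), F.foldl (pvStep n apeach score) res) := by
  intro F
  induction F with
  | nil => intro acc res _; simp
  | cons r F ih =>
    intro acc res hF
    have hd : r.length = d := hF r (List.mem_cons_self ..)
    have hF' : ∀ r' ∈ F, r'.length = d := fun r' h => hF r' (List.mem_cons_of_mem _ h)
    subst hd
    simp only [List.foldl_cons, List.flatMap_cons]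
    by_cases hleaf : r.sum = n ∨ r.length = 10
    · have hleaf' : r.sum = n ∨ ((r.length : Int) = 10) := by
        rcases hleaf with h | h
        · exact Or.inl h
        · exact Or.inr (by omega)
      rw [if_pos hleaf', ih _ _ hF']
      have hB : pvB_value = pvA_value := rfl
      have hexp : pvExp n info r = [] := by rw [pvExp, if_pos hleaf]
      rw [hexp, hB]
      have hstep : pvStep n apeach score res r
          = if pvA_value score r > apeach ∧ pvA_value score r ≥ pvA_value score res then r
            else res := by
        rw [pvStep, if_pos hleaf]
      rw [hstep]
      simp
    · have hleaf' : ¬ (r.sum = n ∨ ((r.length : Int) = 10)) := by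
        intro h; rcases h with h | h
        · exact hleaf (Or.inl h)
        · exact hleaf (Or.inr (by omega))
      rw [if_neg hleaf']
      have hstep : pvStep n apeach score res r = res := by rw [pvStep, if_neg hleaf]
      by_cases hshoot : r.sum + PySem.List.pyGetD info (↑r.length) 0 + 1 ≤ n
      · have hshoot' : r.sum + (PySem.List.pyGetD info (↑r.length) 0 + 1) ≤ n := by omega
        rw [if_pos hshoot', ih _ _ hF', hstep]
        have hexp : pvExp n info r
            = [r ++ [PySem.List.pyGetD info (↑r.length) 0 + 1], r ++ [0]] := by
          rw [pvExp, if_neg hleaf, if_pos hshoot]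
        rw [hexp, List.append_assoc]
      · have hshoot' : ¬ r.sum + (PySem.List.pyGetD info (↑r.length) 0 + 1) ≤ n := by omega
        rw [if_neg hshoot', ih _ _ hF', hstep]
        have hexp : pvExp n info r = [r ++ [0]] := by
          rw [pvExp, if_neg hleaf, if_neg hshoot]
        rw [hexp, List.append_assoc]

theorem pvExp_length (n : Int) (info : List Int) (r r' : List Int)
    (h : r' ∈ pvExp n info r) : r'.length = r.length + 1 := by
  unfold pvExp at h
  split_ifs at h <;> simp only [List.mem_cons, List.not_mem_nil] at h <;>
    rcases h with h | h <;> simp_all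

theorem pvBridge (n : Int) (info score : List Int) (apeach : Int) (hlen : 10 ≤ info.length) :
    ∀ (m d : Nat), d + m = 10 → 1 ≤ d → ∀ (F : List (List Int)) (res : List Int),
      (∀ r ∈ F, r.length = d) →
      pvA_loop n info score apeach F res = pvB_levels n info score apeach (d : Int) F res := by
  intro m
  induction m with
  | zero =>
    intro d hd _ F res hF
    have h10 : d = 10 := by omega
    subst h10
    have hA := pvA_loop_split n info score apeach hlen F [] res
      (fun r h => le_of_eq (hF r h))
    simp only [List.append_nil, List.nil_append] at hA
    rw [hA, pvB_levels]
    have hnot : ¬ (((10 : Nat) : Int) > 10) := by omega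
    rw [if_neg hnot]
    rw [pvB_fold n info score apeach 10 F [] res hF]
    have hnil : F.flatMap (pvExp n info) = [] := by
      rw [List.flatMap_eq_nil_iff]
      intro r hr
      rw [pvExp, if_pos (Or.inr (hF r hr))]
    rw [hnil]
    rw [pvB_levels]
    have hgt : ((10 : Nat) : Int) + 1 > 10 := by omega
    rw [if_pos hgt]
    rw [pvA_loop]
  | succ m ih =>
    intro d hd hd1 F res hF
    have hA := pvA_loop_split n info score apeach hlen F [] res
      (fun r h => by rw [hF r h]; omega)
    simp only [List.append_nil, List.nil_append] at hA
    rw [hA, pvB_levels]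
    have hnot : ¬ (((d : Nat) : Int) > 10) := by omega
    rw [if_neg hnot]
    rw [pvB_fold n info score apeach d F [] res hF]
    have hchild : ∀ r' ∈ F.flatMap (pvExp n info), r'.length = d + 1 := by
      intro r' h
      rw [List.mem_flatMap] at h
      obtain ⟨r, hr, h'⟩ := h
      rw [pvExp_length n info r r' h', hF r hr]
    have := ih (d + 1) (by omega) (by omega) (F.flatMap (pvExp n info))
      (F.foldl (pvStep n apeach score) res) hchild
    rw [List.nil_append]
    rw [this]
    push_cast
    rfl

-- ===== VERDICT (by name: the statement is the Claim_ definition above) =====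
theorem solution_spec : Claim_equal_solution := by
  intro n info _ hpre
  unfold Spec_solution solution solution_alt
  have hsc : pvB_score = pvA_score := rfl
  have hap : pvB_apeach = pvA_apeach := rfl
  rw [hsc, hap]
  have hpre' : 10 ≤ info.length := hpre
  have hq : (if n ≥ PySem.List.pyGetD info 0 0 + 1
      then [[(0 : Int)], [PySem.List.pyGetD info 0 0 + 1]] else [[(0 : Int)]])
      = [[(0 : Int)]] ++ (if PySem.List.pyGetD info 0 0 + 1 ≤ n
          then [[PySem.List.pyGetD info 0 0 + 1]] else []) := by
    by_cases h : PySem.List.pyGetD info 0 0 + 1 ≤ n <;> simp [h, ge_iff_le]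
  have := pvBridge n info (pvA_score info) (pvA_apeach info) hpre' 9 1 rfl le_rfl
    ([[(0 : Int)]] ++ (if PySem.List.pyGetD info 0 0 + 1 ≤ n
        then [[PySem.List.pyGetD info 0 0 + 1]] else [])) []
    (by intro r hr; by_cases h : PySem.List.pyGetD info 0 0 + 1 ≤ n <;>
        simp [h] at hr <;> rcases hr with hr | hr <;> simp_all)
  simp only [Nat.cast_one] at this
  simp only [hq, this]
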